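-- pv_equiv track=rewrite | github.com/aorursy/KT_dataset_py | priy998_bakery-analysis-using-apriori-association-rule.py | freq_itm3
-- ===== SOURCE A (Python) =====
-- from itertools import combinations
--
-- def check_freq(current,previous,n):
--
--     if n > 1:
--
--         subsets = list(combinations(current,n))
--
--     else:
--
--         subsets = current
--
--     for item in subsets:
--
--         if not item in previous:
--
--             return False
--
--         else:
--
--             return True
--
-- def sub_list(item1,item2):
--
--     return set(item1) <= set(item2)
--
-- def freq_itm3(k2,records,min_sup):
--
--     k2 = list(k2.keys())
--
--     L2 = sorted(list(set([item for temp in k2 for item in temp])))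
--
--     L2 = list(combinations(L2,3))
--
--     c3,k3 = {},{}
--
--     for it1 in L2:
--
--         count = 0
--
--         for it2 in records:
--
--             if sub_list(it1,it2):
--
--                 count += 1
--
--         c3[it1] = count
--
--     for key,val in c3.items():
--
--         if val >= min_sup:
--
--             if check_freq(key,k2,2):
--
--                 k3[key] = val
--
--     return c3,k3
-- ===== SOURCE B (Python) =====
-- from itertools import combinations
--
-- def freq_itm3(k2, records, min_sup):
--     pairs = list(k2.keys())
--     items = sorted({item for pair in pairs for item in pair})
--     # support counting in one sweep over the records: pre-initialize every
--     # candidate triple's count, then bump the triples each record contains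
--     c3 = {trip: 0 for trip in combinations(items, 3)}
--     for rec in records:
--         rs = set(rec)
--         present = [x for x in items if x in rs]
--         for trip in combinations(present, 3):
--             c3[trip] += 1
--     # prefix-join test: a triple is frequent if it meets min_sup and
--     # extends a frequent pair (its leading pair appears in L2)
--     k3 = {trip: cnt for trip, cnt in c3.items()
--           if cnt >= min_sup and trip[:2] in pairs}
--     return c3, k3
-- ===== Notes on version B (the rewrite author's own statement) =====
-- stated objective: alternative
-- what changed: A counts support by scanning all records once per candidate 3-itemset (candidate-major nested loops); B pre-initializes every candidate's count to 0 and makes one sweep over the records, enumerating each record's own 3-subsets and incrementing those counts, then keeps triples meeting min_sup whose leading pair is a frequent pair (prefix-join test).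
import Mathlib
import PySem

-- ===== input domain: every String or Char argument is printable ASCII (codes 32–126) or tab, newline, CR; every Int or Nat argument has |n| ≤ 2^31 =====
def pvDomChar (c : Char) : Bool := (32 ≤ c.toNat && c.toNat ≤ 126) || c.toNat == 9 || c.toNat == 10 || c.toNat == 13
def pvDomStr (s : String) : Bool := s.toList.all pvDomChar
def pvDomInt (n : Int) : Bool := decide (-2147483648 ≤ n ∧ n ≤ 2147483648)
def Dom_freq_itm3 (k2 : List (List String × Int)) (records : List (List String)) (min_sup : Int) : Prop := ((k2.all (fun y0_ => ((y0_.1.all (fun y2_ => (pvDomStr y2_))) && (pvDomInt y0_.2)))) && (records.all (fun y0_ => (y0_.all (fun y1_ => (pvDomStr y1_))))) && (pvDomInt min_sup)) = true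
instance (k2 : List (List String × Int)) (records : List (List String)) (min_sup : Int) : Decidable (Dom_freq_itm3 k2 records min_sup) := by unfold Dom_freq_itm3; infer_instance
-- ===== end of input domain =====

-- B replaces A's candidate-triple × record support scan by one sweep over the records that
-- increments pre-initialized counts of each record's own 3-subsets (objective: alternative).

-- itertools.combinations(l, n): the n-element sublists, in Python's order (used by both sources)
def combN {α : Type} : Nat → List α → List (List α)
  | 0, _ => [[]]
  | _ + 1, [] => []
  | n + 1, x :: xs => ((combN n xs).map fun t => x :: t) ++ combN (n + 1) xs

-- ===== PORT A =====
-- check_freq: the Python loop body returns on its FIRST iteration, so only the first element of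
-- `subsets` is examined; `none` = the Python function falls through and returns None (falsy).
-- In the n ≤ 1 branch Python compares a string with the tuples in `previous` (never equal → False).
def check_freq (current : List String) (previous : List (List String)) (n : Int) : Option Bool :=
  if n > 1 then
    match combN n.toNat current with
    | [] => none
    | item :: _ => some (decide (item ∈ previous))
  else
    match current with
    | [] => none
    | _ :: _ => some false

def sub_list (item1 item2 : List String) : Bool :=
  PySem.Set.issubset (PySem.Set.ofList item1) (PySem.Set.ofList item2)

def freq_itm3 (k2 : List (List String × Int)) (records : List (List String)) (min_sup : Int) : (List (List String × Int)) × (List (List String × Int)) :=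
  let k2k := (PySem.Dict.mk k2).keys
  let L2i := PySem.List.sorted (PySem.Set.ofList (k2k.flatMap fun temp => temp)) (fun x => x)
  let L2 := combN 3 L2i
  let c3 := L2.foldl (fun c3 it1 =>
      let count := records.foldl (fun count it2 => if sub_list it1 it2 then count + 1 else count) (0 : Int)
      c3.insert it1 count) (PySem.Dict.mk [])
  let k3 := c3.items.foldl (fun k3 kv =>
      if kv.2 ≥ min_sup then
        if check_freq kv.1 k2k 2 = some true then k3.insert kv.1 kv.2 else k3
      else k3) (PySem.Dict.mk [])
  (c3.items, k3.items)

-- ===== PORT B =====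
-- c3[trip] += 1 is ported as Dict.modify trip 0 (·+1); the key is always present (it was
-- pre-initialized), so the default 0 is never used and Python's KeyError cannot occur.
def freq_itm3_alt (k2 : List (List String × Int)) (records : List (List String)) (min_sup : Int) : (List (List String × Int)) × (List (List String × Int)) :=
  let pairs := (PySem.Dict.mk k2).keys
  let items := PySem.List.sorted (PySem.Set.ofList (pairs.flatMap fun pair => pair)) (fun x => x)
  let c30 := (combN 3 items).foldl (fun d trip => d.insert trip (0 : Int)) (PySem.Dict.mk [])
  let c3 := records.foldl (fun d rec =>
      let rs := PySem.Set.ofList rec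
      let present := items.filter fun x => PySem.Set.contains rs x
      (combN 3 present).foldl (fun d trip => d.modify trip 0 (· + 1)) d) c30
  let k3 := c3.items.foldl (fun k3 kv =>
      if kv.2 ≥ min_sup && decide (PySem.List.slice kv.1 none (some 2) ∈ pairs)
      then k3.insert kv.1 kv.2 else k3) (PySem.Dict.mk [])
  (c3.items, k3.items)

-- ===== PRECONDITION & SPEC =====
def Spec_freq_itm3 (k2 : List (List String × Int)) (records : List (List String)) (min_sup : Int) (out : (List (List String × Int)) × (List (List String × Int))) : Prop := out = freq_itm3_alt k2 records min_sup
instance (k2 : List (List String × Int)) (records : List (List String)) (min_sup : Int) (out : (List (List String × Int)) × (List (List String × Int))) : Decidable (Spec_freq_itm3 k2 records min_sup out) := by unfold Spec_freq_itm3; infer_instance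

-- ===== CLAIM (what is proved, stated in full; the proofs are below) =====
def Claim_equal_freq_itm3 : Prop := ∀ (k2 : List (List String × Int)) (records : List (List String)) (min_sup : Int), Dom_freq_itm3 k2 records min_sup → Spec_freq_itm3 k2 records min_sup (freq_itm3 k2 records min_sup)

-- ===== LEMMAS AND PROOFS =====

theorem mem_of_mem_combN {α : Type} (n : Nat) (l : List α) (t : List α)
    (ht : t ∈ combN n l) : ∀ a ∈ t, a ∈ l := by
  induction l generalizing n t with
  | nil =>
    cases n with
    | zero => simp [combN] at ht; subst ht; simp
    | succ n => simp [combN] at ht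
  | cons x xs ih =>
    cases n with
    | zero => simp [combN] at ht; subst ht; simp
    | succ n =>
      simp only [combN, List.mem_append, List.mem_map] at ht
      rcases ht with ⟨t', ht', rfl⟩ | ht
      · intro a ha
        rcases List.mem_cons.1 ha with rfl | ha
        · exact List.mem_cons_self
        · exact List.mem_cons_of_mem _ (ih n t' ht' a ha)
      · intro a ha
        exact List.mem_cons_of_mem _ (ih (n + 1) t ht a ha)

theorem length_of_mem_combN {α : Type} (n : Nat) (l : List α) (t : List α)
    (ht : t ∈ combN n l) : t.length = n := by
  induction l generalizing n t with
  | nil =>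
    cases n with
    | zero => simp [combN] at ht; subst ht; rfl
    | succ n => simp [combN] at ht
  | cons x xs ih =>
    cases n with
    | zero => simp [combN] at ht; subst ht; rfl
    | succ n =>
      simp only [combN, List.mem_append, List.mem_map] at ht
      rcases ht with ⟨t', ht', rfl⟩ | ht
      · simp [ih n t' ht']
      · exact ih (n + 1) t ht

theorem nodup_combN {α : Type} (n : Nat) (l : List α) (h : l.Nodup) :
    (combN n l).Nodup := by
  induction l generalizing n with
  | nil =>
    cases n with
    | zero => simp [combN]
    | succ n => simp [combN]
  | cons x xs ih =>
    have hx : x ∉ xs := (List.nodup_cons.1 h).1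
    have hxs : xs.Nodup := (List.nodup_cons.1 h).2
    cases n with
    | zero => simp [combN]
    | succ n =>
      simp only [combN]
      refine List.Nodup.append ?_ (ih (n + 1) hxs) ?_
      · exact (ih n hxs).map (fun t t' htt => by simpa using htt)
      · intro t h1 h2
        rcases List.mem_map.1 h1 with ⟨t', _, rfl⟩
        exact hx (mem_of_mem_combN (n + 1) xs _ h2 x List.mem_cons_self)

theorem combN_filter {α : Type} (n : Nat) (p : α → Bool) (l : List α) :
    combN n (l.filter p) = (combN n l).filter (fun t => t.all p) := by
  induction l generalizing n with
  | nil =>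
    cases n with
    | zero => simp [combN]
    | succ n => simp [combN]
  | cons x xs ih =>
    cases n with
    | zero => simp [combN]
    | succ n =>
      by_cases hp : p x
      · rw [List.filter_cons_of_pos hp]
        simp only [combN, List.filter_append, List.filter_map, ih]
        congr 1
        congr 1
        apply List.filter_congr
        intro t _
        simp [Function.comp, hp]
      · rw [List.filter_cons_of_neg hp]
        simp only [combN, List.filter_append, List.filter_map, ih]
        have hz : (List.filter ((fun t => t.all p) ∘ fun t => x :: t) (combN n xs)) = [] := by
          apply List.filter_eq_nil_iff.2
          intro t _
          simp [Function.comp, hp]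
        rw [hz]
        simp

-- a Nodup-keyed association list is recovered from its keys and its lookups
theorem assoc_eq_map_keys_getD {κ ν : Type} [BEq κ] [LawfulBEq κ] (l : List (κ × ν)) (d0 : ν)
    (h : (l.map Prod.fst).Nodup) :
    l = (l.map Prod.fst).map (fun k => (k, (PySem.Dict.mk l).getD k d0)) := by
  induction l with
  | nil => simp
  | cons q rest ih =>
    obtain ⟨k, v⟩ := q
    simp only [List.map_cons] at h ⊢
    have h1 : k ∉ rest.map Prod.fst := (List.nodup_cons.1 h).1
    have h2 : (rest.map Prod.fst).Nodup := (List.nodup_cons.1 h).2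
    have hd : (PySem.Dict.mk ((k, v) :: rest)).getD k d0 = v := by
      simp [PySem.Dict.getD, PySem.Dict.get?_mk_cons]
    rw [hd]
    congr 1
    conv_lhs => rw [ih h2]
    apply List.map_congr_left
    intro k' hk'
    have hne : (k == k') = false := by
      rcases List.mem_map.1 hk' with ⟨q', hq', rfl⟩
      apply beq_eq_false_iff_ne.2
      intro hkq
      exact h1 (hkq ▸ List.mem_map_of_mem hq')
    simp only [PySem.Dict.getD, PySem.Dict.get?_mk_cons, hne]
    simp

theorem set_update_of_subset {α : Type} [BEq α] [LawfulBEq α] (s : PySem.Set α) (l : List α)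
    (h : ∀ x ∈ l, x ∈ s) : PySem.Set.update s l = s := by
  induction l with
  | nil => rfl
  | cons x xs ih =>
    have hx : x ∈ s := h x (List.mem_cons_self)
    have hadd : PySem.Set.add s x = s := by
      simp [PySem.Set.add, PySem.Set.contains, hx]
    show List.foldl PySem.Set.add s (x :: xs) = s
    rw [List.foldl_cons]
    show PySem.Set.update (PySem.Set.add s x) xs = s
    rw [hadd]
    exact ih (fun y hy => h y (List.mem_cons_of_mem _ hy))

-- items were sorted(set(...)): duplicate-free
theorem pvItems_nodup (l : List String) :
    (PySem.List.sorted (PySem.Set.ofList l) (fun x => x)).Nodup :=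
  (List.Perm.nodup_iff (PySem.List.sorted_perm _ _ _)).2 (PySem.Set.nodup_ofList l)

-- the record membership test B uses equals A's sub_list
theorem all_contains_eq_sub_list (t r : List String) :
    (t.all fun x => PySem.Set.contains (PySem.Set.ofList r) x) = sub_list t r := by
  rw [Bool.eq_iff_iff]
  simp [sub_list, List.all_eq_true, PySem.Set.issubset_iff, PySem.Set.mem_ofList,
    PySem.Set.contains]

-- lookup of a triple in the zero-initialized dict is 0
theorem getD_zero_init {κ : Type} [BEq κ] (L : List κ) (t : κ) :
    (PySem.Dict.mk (L.map (fun t => (t, (0 : Int))))).getD t 0 = 0 := by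
  induction L with
  | nil => rfl
  | cons x xs ih =>
    simp only [List.map_cons, PySem.Dict.getD, PySem.Dict.get?_mk_cons] at *
    by_cases hx : (x == t) = true
    · simp [hx]
    · simp only [hx]
      simpa [PySem.Dict.getD] using ih

-- A's c3 loop builds exactly the support table, keyed in candidate order
theorem A_c3_items (items : List String) (records : List (List String))
    (hn : items.Nodup) :
    ((combN 3 items).foldl (fun c3 it1 =>
        c3.insert it1 (records.foldl (fun count it2 => if sub_list it1 it2 then count + 1 else count) (0 : Int)))
      (PySem.Dict.mk [])).items
    = (combN 3 items).map (fun t => (t, ((records.countP fun r => sub_list t r : Nat) : Int))) := by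
  have hrw : ∀ it1 : List String,
      records.foldl (fun count it2 => if sub_list it1 it2 then count + 1 else count) (0 : Int)
      = ((records.countP fun r => sub_list it1 r : Nat) : Int) := by
    intro it1
    rw [PySem.List.foldl_count_if (fun it2 => sub_list it1 it2) records 0]
    simp
  have := PySem.Dict.items_foldl_insert_fresh (combN 3 items) (fun t => t)
    (fun t => ((records.countP fun r => sub_list t r : Nat) : Int)) (PySem.Dict.mk [])
    (fun a _ => rfl) (by simpa using nodup_combN 3 items hn)
  calc ((combN 3 items).foldl (fun c3 it1 =>
        c3.insert it1 (records.foldl (fun count it2 => if sub_list it1 it2 then count + 1 else count) (0 : Int)))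
      (PySem.Dict.mk [])).items
      = ((combN 3 items).foldl (fun c3 it1 =>
        c3.insert it1 ((records.countP fun r => sub_list it1 r : Nat) : Int)) (PySem.Dict.mk [])).items := by
        congr 1
        apply PySem.List.foldl_congr_mem
        intro acc it1 _
        rw [hrw]
    _ = (combN 3 items).map (fun t => (t, ((records.countP fun r => sub_list t r : Nat) : Int))) := by
        rw [this]; rfl

-- one record's sweep in B increments exactly the triples it supports (lookup view)
theorem B_fold_getD (items : List String) (hn : items.Nodup) (records : List (List String))
    (t : List String) (ht : t ∈ combN 3 items) :
    ∀ d : PySem.Dict (List String) Int,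
      (records.foldl (fun d rec =>
          (combN 3 (items.filter fun x => PySem.Set.contains (PySem.Set.ofList rec) x)).foldl
            (fun d trip => d.modify trip 0 (· + 1)) d) d).getD t 0
      = d.getD t 0 + ((records.countP fun r => sub_list t r : Nat) : Int) := by
  induction records with
  | nil => intro d; simp
  | cons r rs ih =>
    intro d
    rw [List.foldl_cons, ih]
    rw [PySem.Dict.getD_foldl_modify_add_one]
    rw [combN_filter]
    have hcnt : (List.count t ((combN 3 items).filter fun t =>
        t.all fun x => PySem.Set.contains (PySem.Set.ofList r) x) : Int)
        = if sub_list t r then 1 else 0 := by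
      by_cases hs : sub_list t r = true
      · rw [if_pos hs]
        have hmem : t ∈ (combN 3 items).filter (fun t =>
            t.all fun x => PySem.Set.contains (PySem.Set.ofList r) x) :=
          List.mem_filter.2 ⟨ht, by rw [all_contains_eq_sub_list]; exact hs⟩
        have := List.count_eq_one_of_mem ((nodup_combN 3 items hn).filter _) hmem
        rw [this]; rfl
      · rw [if_neg hs]
        have hnm : t ∉ (combN 3 items).filter (fun t =>
            t.all fun x => PySem.Set.contains (PySem.Set.ofList r) x) := by
          intro hmem
          exact hs (by rw [← all_contains_eq_sub_list t r]; exact (List.mem_filter.1 hmem).2)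
        rw [List.count_eq_zero_of_not_mem hnm]; rfl
    rw [hcnt, List.countP_cons]
    by_cases hs : sub_list t r = true
    · simp [hs]
      ring
    · simp [hs]

-- B's record sweep never adds keys (every incremented triple is already a key)
theorem B_fold_keys (items : List String) (records : List (List String)) :
    ∀ d : PySem.Dict (List String) Int, (∀ t ∈ combN 3 items, t ∈ d.keys) →
      (records.foldl (fun d rec =>
          (combN 3 (items.filter fun x => PySem.Set.contains (PySem.Set.ofList rec) x)).foldl
            (fun d trip => d.modify trip 0 (· + 1)) d) d).keys = d.keys := by
  induction records with
  | nil => intro d _; rfl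
  | cons r rs ih =>
    intro d hd
    rw [List.foldl_cons]
    have hstep : ((combN 3 (items.filter fun x => PySem.Set.contains (PySem.Set.ofList r) x)).foldl
        (fun d trip => d.modify trip 0 (· + 1)) d).keys = d.keys := by
      rw [PySem.Dict.keys_foldl_modify (f := fun _ _ v => v + 1)]
      apply set_update_of_subset
      intro x hx
      rw [combN_filter] at hx
      exact hd x (List.mem_filter.1 hx).1
    rw [ih _ (fun t htm => by rw [hstep]; exact hd t htm), hstep]

-- B's two loops build the same support table as A's
theorem B_c3_items (items : List String) (records : List (List String))
    (hn : items.Nodup) :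
    (records.foldl (fun d rec =>
        (combN 3 (items.filter fun x => PySem.Set.contains (PySem.Set.ofList rec) x)).foldl
          (fun d trip => d.modify trip 0 (· + 1)) d)
      ((combN 3 items).foldl (fun d trip => d.insert trip (0 : Int)) (PySem.Dict.mk []))).items
    = (combN 3 items).map (fun t => (t, ((records.countP fun r => sub_list t r : Nat) : Int))) := by
  have hnd3 := nodup_combN 3 items hn
  have hc30 : ((combN 3 items).foldl (fun d trip => d.insert trip (0 : Int)) (PySem.Dict.mk [])).items
      = (combN 3 items).map (fun t => (t, (0 : Int))) := by
    have := PySem.Dict.items_foldl_insert_fresh (combN 3 items) (fun t => t)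
      (fun _ => (0 : Int)) (PySem.Dict.mk []) (fun a _ => rfl) (by simpa using hnd3)
    rw [this]; rfl
  set D := records.foldl (fun d rec =>
      (combN 3 (items.filter fun x => PySem.Set.contains (PySem.Set.ofList rec) x)).foldl
        (fun d trip => d.modify trip 0 (· + 1)) d)
    ((combN 3 items).foldl (fun d trip => d.insert trip (0 : Int)) (PySem.Dict.mk [])) with hD
  have hkeys : D.keys = combN 3 items := by
    rw [hD, B_fold_keys items records _ ?_]
    · show (((combN 3 items).foldl (fun d trip => d.insert trip (0 : Int)) (PySem.Dict.mk [])).items.map Prod.fst) = _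
      rw [hc30]
      simp [Function.comp_def]
    · intro t htm
      show t ∈ ((combN 3 items).foldl (fun d trip => d.insert trip (0 : Int)) (PySem.Dict.mk [])).items.map Prod.fst
      rw [hc30]
      simpa [Function.comp_def] using htm
  have hkn : (D.items.map Prod.fst).Nodup := by
    show D.keys.Nodup
    rw [hkeys]; exact hnd3
  have hitems := assoc_eq_map_keys_getD D.items (0 : Int) hkn
  have hmkD : PySem.Dict.mk D.items = D := rfl
  rw [hmkD] at hitems
  have hkeys' : D.items.map Prod.fst = combN 3 items := hkeys
  rw [hitems, hkeys']
  apply List.map_congr_left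
  intro t htm
  congr 1
  have hgd := B_fold_getD items hn records t htm
    ((combN 3 items).foldl (fun d trip => d.insert trip (0 : Int)) (PySem.Dict.mk []))
  rw [← hD] at hgd
  rw [hgd]
  have h0 : ((combN 3 items).foldl (fun d trip => d.insert trip (0 : Int)) (PySem.Dict.mk [])).getD t 0 = 0 := by
    have : ((combN 3 items).foldl (fun d trip => d.insert trip (0 : Int)) (PySem.Dict.mk []))
        = PySem.Dict.mk ((combN 3 items).map (fun t => (t, (0 : Int)))) := by
      apply PySem.Dict.ext
      rw [hc30]
    rw [this, getD_zero_init]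
  rw [h0, zero_add]

-- the two k3 filters agree on every length-3 key
theorem k3_fold_eq (M : List (List String × Int)) (k2k : List (List String)) (min_sup : Int)
    (hlen : ∀ kv ∈ M, kv.1.length = 3) :
    M.foldl (fun k3 kv =>
        if kv.2 ≥ min_sup then
          if check_freq kv.1 k2k 2 = some true then k3.insert kv.1 kv.2 else k3
        else k3) (PySem.Dict.mk [])
    = M.foldl (fun k3 kv =>
        if kv.2 ≥ min_sup && decide (PySem.List.slice kv.1 none (some 2) ∈ k2k)
        then k3.insert kv.1 kv.2 else k3) (PySem.Dict.mk []) := by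
  apply PySem.List.foldl_congr_mem' _ _ _ _ ?_
  intro kv hkv acc
  obtain ⟨a, b, c, habc⟩ := List.length_eq_three.1 (hlen kv hkv)
  have hcf : check_freq kv.1 k2k 2 = some (decide ([a, b] ∈ k2k)) := by
    rw [habc]
    simp [check_freq, combN]
  have hsl : PySem.List.slice kv.1 none (some 2) = [a, b] := by
    rw [habc, PySem.List.slice_to (xs := [a, b, c]) (b := 2) (by norm_num)]
    rfl
  rw [hcf, hsl]
  by_cases h1 : kv.2 ≥ min_sup <;> by_cases h2 : [a, b] ∈ k2k <;> simp [h1, h2]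

-- ===== VERDICT (by name: the statement is the Claim_ definition above) =====
theorem freq_itm3_spec : Claim_equal_freq_itm3 := by
  intro k2 records min_sup _
  unfold Spec_freq_itm3
  show freq_itm3 k2 records min_sup = freq_itm3_alt k2 records min_sup
  unfold freq_itm3 freq_itm3_alt
  simp only []
  set k2k := (PySem.Dict.mk k2).keys with hk2k
  set items := PySem.List.sorted (PySem.Set.ofList (k2k.flatMap fun t => t)) (fun x => x) with hitems
  have hn : items.Nodup := pvItems_nodup _
  have hA := A_c3_items items records hn
  have hB := B_c3_items items records hn
  rw [Prod.mk.injEq]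
  constructor
  · rw [hA, hB]
  · rw [hA, hB]
    apply congrArg
    apply k3_fold_eq
    intro kv hkv
    rcases List.mem_map.1 hkv with ⟨t, htm, rfl⟩
    exact length_of_mem_combN 3 items t htm
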